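-- pv_equiv track=rewrite | github.com/KingAdonay/Data-structure-and-algorithms | math and implementation/NumberDiversity.py | get_max_diversity
-- ===== SOURCE A (Python) =====
-- def get_max_diversity(nums):
--     sett = set()
--     duplicates = set()
--
--     n = len(nums)
--     for i in range(n):
--         value = abs(nums[i])
--         if value not in sett:
--             sett.add(value)
--         elif value != 0:
--             duplicates.add(value)
--
--     unique_variations = len(sett) + len(duplicates)
--
--     return unique_variations
-- ===== SOURCE B (Python) =====
-- def get_max_diversity(nums):
--     # Sort the absolute values, then scan maximal runs of equal values:
--     # each run contributes 1 (the distinct value) plus 1 more if it is a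
--     # non-zero value occurring at least twice.
--     vals = sorted(abs(x) for x in nums)
--     n = len(vals)
--     total = 0
--     i = 0
--     while i < n:
--         run = 1
--         while i + run < n and vals[i + run] == vals[i]:
--             run += 1
--         total += 2 if (vals[i] != 0 and run >= 2) else 1
--         i += run
--     return total
-- ===== Notes on version B (the rewrite author's own statement) =====
-- stated objective: alternative
-- what changed: Replaces A's one-pass two-set (seen/duplicates) bookkeeping with a sort-then-run-scan: sort the absolute values, then walk maximal runs of equal values, adding 1 per run plus 1 more for each non-zero run of length >= 2.
import Mathlib
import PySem

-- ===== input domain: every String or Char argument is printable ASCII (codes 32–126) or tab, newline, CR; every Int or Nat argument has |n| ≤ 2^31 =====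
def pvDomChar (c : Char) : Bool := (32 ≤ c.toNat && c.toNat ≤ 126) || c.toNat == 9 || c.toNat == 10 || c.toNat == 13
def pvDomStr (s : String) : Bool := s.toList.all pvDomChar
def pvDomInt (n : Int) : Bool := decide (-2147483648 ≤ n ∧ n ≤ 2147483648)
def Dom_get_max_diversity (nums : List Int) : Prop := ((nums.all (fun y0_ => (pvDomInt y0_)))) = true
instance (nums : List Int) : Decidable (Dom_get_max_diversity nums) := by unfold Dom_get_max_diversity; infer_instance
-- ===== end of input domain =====

-- B replaces A's one-pass two-set (seen/duplicates) bookkeeping with a sort-then-run-scan over the sorted absolute values (alternative algorithm).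

-- ===== PORT A =====
def get_max_diversity (nums : List Int) : Int :=
  let st := nums.foldl (fun (st : PySem.Set Int × PySem.Set Int) x =>
      let value := |x|
      if value ∉ st.1 then (PySem.Set.add st.1 value, st.2)
      else if value ≠ 0 then (st.1, PySem.Set.add st.2 value)
      else st)
    (PySem.Set.empty, PySem.Set.empty)
  (st.1.length : Int) + (st.2.length : Int)

-- ===== PORT B =====
-- Source B's outer while loop: consume one maximal run of equal values per step
-- (the inner while loop computing `run` is the takeWhile length; `i += run` is the dropWhile)
def pvRunScan : List Int → Int
  | [] => 0
  | v :: t =>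
    let run := 1 + (t.takeWhile (fun y => y == v)).length
    (if v ≠ 0 ∧ 2 ≤ run then 2 else 1) + pvRunScan (t.dropWhile (fun y => y == v))
termination_by l => l.length
decreasing_by
  simpa using Nat.lt_succ_of_le (List.length_dropWhile_le _ _)

def get_max_diversity_alt (nums : List Int) : Int :=
  pvRunScan (PySem.List.sorted (nums.map (fun x => |x|)) (fun v => v) false)

-- ===== PRECONDITION & SPEC =====
def Spec_get_max_diversity (nums : List Int) (out : Int) : Prop := out = get_max_diversity_alt nums
instance (nums : List Int) (out : Int) : Decidable (Spec_get_max_diversity nums out) := by unfold Spec_get_max_diversity; infer_instance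

-- ===== CLAIM (what is proved, stated in full; the proofs are below) =====
def Claim_equal_get_max_diversity : Prop := ∀ (nums : List Int), Dom_get_max_diversity nums → Spec_get_max_diversity nums (get_max_diversity nums)

-- ===== LEMMAS AND PROOFS =====

-- the body of A's loop, named for the proofs (definitionally the lambda in the port)
def pvStep (st : PySem.Set Int × PySem.Set Int) (x : Int) : PySem.Set Int × PySem.Set Int :=
  let value := |x|
  if value ∉ st.1 then (PySem.Set.add st.1 value, st.2)
  else if value ≠ 0 then (st.1, PySem.Set.add st.2 value)
  else st

theorem pv_ofList_concat (m : List Int) (v : Int) :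
    PySem.Set.ofList (m ++ [v]) = PySem.Set.add (PySem.Set.ofList m) v := by
  rw [PySem.Set.ofList_eq_foldl, PySem.Set.ofList_eq_foldl, List.foldl_append]; rfl

theorem pv_add_of_mem (s : PySem.Set Int) (v : Int) (h : v ∈ s) : PySem.Set.add s v = s := by
  simp [PySem.Set.add, PySem.Set.contains, h]

-- A's loop invariant: starting from (set(m), d) where d collects exactly the non-zero values
-- occurring at least twice in m, the fold computes set(m ++ |l|) and the duplicates of m ++ |l|.
theorem pvA_loop (l : List Int) : ∀ (m d : List Int), d.Nodup →
    (∀ k, k ∈ d ↔ k ≠ 0 ∧ 2 ≤ m.count k) →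
    (l.foldl pvStep (PySem.Set.ofList m, d)).1 = PySem.Set.ofList (m ++ l.map (fun x => |x|)) ∧
    (l.foldl pvStep (PySem.Set.ofList m, d)).2.Nodup ∧
    ∀ k, (k ∈ (l.foldl pvStep (PySem.Set.ofList m, d)).2 ↔
      k ≠ 0 ∧ 2 ≤ (m ++ l.map (fun x => |x|)).count k) := by
  induction l with
  | nil =>
    intro m d hd hmem
    rw [List.map_nil, List.append_nil]
    exact ⟨rfl, hd, hmem⟩
  | cons x l ih =>
    intro m d hd hmem
    have hmx : |x| ∈ PySem.Set.ofList m ↔ |x| ∈ m := PySem.Set.mem_ofList m |x|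
    have hcnt : ∀ k, (m ++ [|x|]).count k = m.count k + (if |x| = k then 1 else 0) := by
      intro k
      by_cases hk : |x| = k <;> simp [List.count_append, hk]
    have hreassoc : (m ++ [|x|]) ++ l.map (fun y => |y|) = m ++ (x :: l).map (fun y => |y|) := by
      simp
    by_cases h1 : |x| ∈ PySem.Set.ofList m
    · by_cases h2 : |x| = (0 : Int)
      · -- seen before, zero: state unchanged
        have hstep : pvStep (PySem.Set.ofList m, d) x = (PySem.Set.ofList (m ++ [|x|]), d) := by
          rw [pv_ofList_concat, pv_add_of_mem _ _ h1]
          show (if |x| ∉ PySem.Set.ofList m then _ else if |x| ≠ 0 then _ else _) = _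
          rw [if_neg (not_not_intro h1), if_neg (not_not_intro h2)]
        have hmem' : ∀ k, k ∈ d ↔ k ≠ 0 ∧ 2 ≤ (m ++ [|x|]).count k := by
          intro k
          rw [hmem k, hcnt k]
          by_cases hk : |x| = k
          · have : k = 0 := by omega
            simp [this]
          · simp [hk]
        have := ih (m ++ [|x|]) d hd hmem'
        rw [hreassoc] at this
        simpa [List.foldl_cons, hstep] using this
      · -- seen before, non-zero: add to duplicates
        have hstep : pvStep (PySem.Set.ofList m, d) x
            = (PySem.Set.ofList (m ++ [|x|]), PySem.Set.add d |x|) := by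
          rw [pv_ofList_concat, pv_add_of_mem _ _ h1]
          show (if |x| ∉ PySem.Set.ofList m then _ else if |x| ≠ 0 then _ else _) = _
          rw [if_neg (not_not_intro h1), if_pos h2]
        have hcpos : 1 ≤ m.count |x| := List.count_pos_iff.mpr (hmx.mp h1)
        have hmem' : ∀ k, k ∈ PySem.Set.add d |x| ↔ k ≠ 0 ∧ 2 ≤ (m ++ [|x|]).count k := by
          intro k
          rw [PySem.Set.mem_add d |x| k, hmem k, hcnt k]
          by_cases hk : |x| = k
          · subst hk
            rw [if_pos rfl]
            constructor
            · intro _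
              exact ⟨h2, by omega⟩
            · intro _
              exact Or.inr rfl
          · rw [if_neg hk, add_zero]
            constructor
            · rintro (h | h)
              · exact h
              · exact absurd h.symm hk
            · exact Or.inl
        have := ih (m ++ [|x|]) (PySem.Set.add d |x|) (PySem.Set.nodup_add d |x| hd) hmem'
        rw [hreassoc] at this
        simpa [List.foldl_cons, hstep] using this
    · -- first occurrence: add to the seen set
      have hstep : pvStep (PySem.Set.ofList m, d) x = (PySem.Set.ofList (m ++ [|x|]), d) := by
        rw [pv_ofList_concat]
        show (if |x| ∉ PySem.Set.ofList m then _ else if |x| ≠ 0 then _ else _) = _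
        rw [if_pos h1]
      have hc0 : m.count |x| = 0 := by
        rw [List.count_eq_zero]
        exact fun h => h1 (hmx.mpr h)
      have hmem' : ∀ k, k ∈ d ↔ k ≠ 0 ∧ 2 ≤ (m ++ [|x|]).count k := by
        intro k
        rw [hmem k, hcnt k]
        by_cases hk : |x| = k
        · subst hk
          simp [hc0]
        · simp [hk]
      have := ih (m ++ [|x|]) d hd hmem'
      rw [hreassoc] at this
      simpa [List.foldl_cons, hstep] using this

-- the first element of the run-free tail is strictly larger than v, so v is not in it
theorem pv_head_not_mem (v : Int) (t : List Int) (ht : t.Pairwise (· ≤ ·))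
    (hvle : ∀ y ∈ t, v ≤ y) : v ∉ t.dropWhile (fun y => y == v) := by
  cases hre : t.dropWhile (fun y => y == v) with
  | nil => simp
  | cons b r' =>
    intro hmem
    have hsub : (b :: r').Sublist t := hre ▸ List.dropWhile_sublist _
    have hb : ¬ ((b == v) = true) := by
      have h2 : t.dropWhile (fun y => y == v) ≠ [] := by rw [hre]; simp
      have h3 := List.head_dropWhile_not (fun y => y == v) h2
      simpa [hre] using h3
    have hbv : b ≠ v := by simpa using hb
    have hvb : v < b := lt_of_le_of_ne (hvle b (hsub.mem List.mem_cons_self)) (Ne.symm hbv)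
    have hps : (b :: r').Pairwise (· ≤ ·) := ht.sublist hsub
    rcases List.mem_cons.mp hmem with h | h
    · exact hbv h.symm
    · have : b ≤ v := (List.pairwise_cons.mp hps).1 v h
      omega

theorem pvRunScan_sorted : ∀ (n : Nat) (l : List Int), l.length ≤ n → l.Pairwise (· ≤ ·) →
    pvRunScan l = ((PySem.Set.ofList l).length : Int)
      + (((PySem.Set.ofList l).filter (fun k => decide (k ≠ 0) && decide (2 ≤ l.count k))).length : Int) := by
  intro n
  induction n with
  | zero =>
    intro l hl _
    have : l = [] := List.eq_nil_of_length_eq_zero (Nat.le_zero.mp hl)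
    subst this
    norm_num [pvRunScan, PySem.Set.ofList]
  | succ n ih =>
    intro l hl hs
    match l with
    | [] => norm_num [pvRunScan, PySem.Set.ofList]
    | v :: t =>
      set p : Int → Bool := fun y => y == v with hp
      set t1 := t.takeWhile p with ht1
      set r := t.dropWhile p with hr
      have hsplit : t1 ++ r = t := List.takeWhile_append_dropWhile
      have ht1v : ∀ y ∈ t1, y = v := by
        intro y hy
        have := List.mem_takeWhile_imp hy
        simpa [hp] using this
      have hvle : ∀ y ∈ t, v ≤ y := (List.pairwise_cons.mp hs).1
      have hts : t.Pairwise (· ≤ ·) := (List.pairwise_cons.mp hs).2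
      have hrsub : r.Sublist t := List.dropWhile_sublist p
      have hrs : r.Pairwise (· ≤ ·) := hts.sublist hrsub
      have hvr : v ∉ r := hr ▸ pv_head_not_mem v t hts hvle
      -- membership in l versus r
      have hmem_iff : ∀ k, k ∈ v :: t ↔ k = v ∨ k ∈ r := by
        intro k
        constructor
        · intro h
          rcases List.mem_cons.mp h with h | h
          · exact Or.inl h
          · rw [← hsplit] at h
            rcases List.mem_append.mp h with h | h
            · exact Or.inl (ht1v k h)
            · exact Or.inr h
        · rintro (h | h)
          · exact h ▸ List.mem_cons_self
          · exact List.mem_cons_of_mem v (hrsub.mem h)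
      -- counts
      have hcount_v : (v :: t).count v = 1 + t1.length := by
        have h1 : t1.count v = t1.length := List.count_eq_length.mpr (fun y hy => (ht1v y hy) ▸ rfl)
        have h2 : r.count v = 0 := List.count_eq_zero.mpr hvr
        rw [← hsplit]
        simp [List.count_append, h1, h2]
        omega
      have hcount_ne : ∀ k, k ≠ v → (v :: t).count k = r.count k := by
        intro k hk
        have h1 : t1.count k = 0 := List.count_eq_zero.mpr (fun h => hk (ht1v k h))
        have hvk : ¬ v = k := fun h => hk h.symm
        rw [← hsplit]
        simp [List.count_append, h1, hvk]
      -- ofList (v :: t) is a permutation of v :: ofList r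
      have hperm : (PySem.Set.ofList (v :: t)).Perm (v :: PySem.Set.ofList r) := by
        apply (List.perm_ext_iff_of_nodup (PySem.Set.nodup_ofList _) ?_).mpr
        · intro k
          rw [PySem.Set.mem_ofList, hmem_iff k, List.mem_cons, PySem.Set.mem_ofList]
        · exact List.nodup_cons.mpr ⟨fun h => hvr ((PySem.Set.mem_ofList r v).mp h), PySem.Set.nodup_ofList r⟩
      -- the filter predicates agree on members of r
      have hfc : (PySem.Set.ofList r).filter (fun k => decide (k ≠ 0) && decide (2 ≤ (v :: t).count k))
          = (PySem.Set.ofList r).filter (fun k => decide (k ≠ 0) && decide (2 ≤ r.count k)) := by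
        apply List.filter_congr
        intro k hk
        have hk' : k ∈ r := (PySem.Set.mem_ofList r k).mp hk
        have hkv : k ≠ v := fun h => hvr (h ▸ hk')
        rw [hcount_ne k hkv]
      have hrun : pvRunScan (v :: t)
          = (if v ≠ 0 ∧ 2 ≤ 1 + t1.length then 2 else 1) + pvRunScan r := by
        rw [pvRunScan]
      have hih := ih r
        (by
          have h := List.length_dropWhile_le p t
          rw [← hr] at h
          exact le_trans h (Nat.le_of_succ_le_succ hl)) hrs
      have hlen : (PySem.Set.ofList (v :: t)).length = 1 + (PySem.Set.ofList r).length := by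
        rw [hperm.length_eq]
        simp [Nat.add_comm]
      have hflen : ((PySem.Set.ofList (v :: t)).filter (fun k => decide (k ≠ 0) && decide (2 ≤ (v :: t).count k))).length
          = ((if v ≠ 0 ∧ 2 ≤ 1 + t1.length then 1 else 0) : Nat)
            + ((PySem.Set.ofList r).filter (fun k => decide (k ≠ 0) && decide (2 ≤ r.count k))).length := by
        rw [(hperm.filter _).length_eq, List.filter_cons, hfc]
        by_cases hv : v ≠ 0 ∧ 2 ≤ 1 + t1.length
        · rw [if_pos hv]
          have hd : (decide (v ≠ 0) && decide (2 ≤ (v :: t).count v)) = true := by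
            rw [hcount_v]
            simp [hv.1, hv.2]
          rw [hd, if_pos rfl, List.length_cons]
          omega
        · rw [if_neg hv]
          have hd : (decide (v ≠ 0) && decide (2 ≤ (v :: t).count v)) = false := by
            rw [hcount_v]
            by_cases h0 : v = 0
            · simp [h0]
            · have h2 : ¬ (2 ≤ 1 + t1.length) := fun h => hv ⟨h0, h⟩
              simp [h0, h2]
          rw [hd, if_neg (by simp)]
          omega
      rw [hrun, hih, hlen, hflen]
      by_cases hv : v ≠ 0 ∧ 2 ≤ 1 + t1.length
      · rw [if_pos hv, if_pos hv]
        push_cast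
        ring
      · rw [if_neg hv, if_neg hv]
        push_cast
        ring

-- ===== VERDICT (by name: the statement is the Claim_ definition above) =====
theorem get_max_diversity_spec : Claim_equal_get_max_diversity := by
  intro nums _
  unfold Spec_get_max_diversity get_max_diversity get_max_diversity_alt
  obtain ⟨h1, h2, h3⟩ := pvA_loop nums [] [] List.nodup_nil (by simp)
  set X := nums.map (fun x => |x|) with hX
  set S := PySem.List.sorted X (fun v => v) false with hS
  have hSperm : S.Perm X := PySem.List.sorted_perm X _ _
  have hSpair : S.Pairwise (· ≤ ·) := by
    rw [hS]
    simpa using PySem.List.sorted_pairwise (xs := X) (key := fun v => v)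
  have hB := pvRunScan_sorted S.length S le_rfl hSpair
  -- A's fold is the fold of pvStep from the empty state
  show ((nums.foldl pvStep (PySem.Set.empty, PySem.Set.empty)).1.length : Int)
      + ((nums.foldl pvStep (PySem.Set.empty, PySem.Set.empty)).2.length : Int) = pvRunScan S
  have hinit : (PySem.Set.empty, PySem.Set.empty) = ((PySem.Set.ofList [] : PySem.Set Int), ([] : List Int)) := rfl
  rw [hinit, hB]
  simp only [List.nil_append] at h1 h3
  -- distinct counts agree: set(X) and set(sorted(X)) have the same elements and are nodup
  have hlen : (nums.foldl pvStep (PySem.Set.ofList [], ([] : List Int))).1.length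
      = (PySem.Set.ofList S).length := by
    rw [h1]
    apply List.Perm.length_eq
    apply (List.perm_ext_iff_of_nodup (PySem.Set.nodup_ofList X) (PySem.Set.nodup_ofList S)).mpr
    intro k
    rw [PySem.Set.mem_ofList, PySem.Set.mem_ofList, hSperm.mem_iff]
  -- A's duplicates and B's heavy runs agree: both are the non-zero values with count ≥ 2
  have hdup : (nums.foldl pvStep (PySem.Set.ofList [], ([] : List Int))).2.length
      = ((PySem.Set.ofList S).filter (fun k => decide (k ≠ 0) && decide (2 ≤ S.count k))).length := by
    apply List.Perm.length_eq
    apply (List.perm_ext_iff_of_nodup h2 ((PySem.Set.nodup_ofList S).filter _)).mpr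
    intro a
    rw [h3 a, List.mem_filter, PySem.Set.mem_ofList]
    constructor
    · rintro ⟨ha0, ha2⟩
      have haX : a ∈ X := List.count_pos_iff.mp (by omega)
      exact ⟨hSperm.mem_iff.mpr haX, by simp [hSperm.count_eq, ha0, ha2]⟩
    · rintro ⟨_, hb⟩
      simp only [Bool.and_eq_true, decide_eq_true_eq, hSperm.count_eq] at hb
      exact hb
  rw [hlen, hdup]
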